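-- pv_equiv track=rewrite | github.com/kky990826/algorithm-daily-commit | 2025-05-09/slicing_an_array.py | solution
-- ===== SOURCE A (Python) =====
-- def solution(arr, query):
--     for i in range(len(query)):
--         q = query[i]
--         if q >= len(arr):
--             q = len(arr) - 1
--         if i % 2 == 0:
--             arr = arr[:q+1]
--         else:
--             arr = arr[q:]
--     return arr
-- ===== SOURCE B (Python) =====
-- def _norm(idx, m):
--     # normalize a slice boundary (known to be <= m) for a window of length m
--     if idx < 0:
--         idx += m
--     return idx if idx > 0 else 0
--
--
-- def solution(arr, query):
--     # Track the surviving window [lo:hi) of the original array; each query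
--     # updates the bounds in O(1), and the array is sliced once at the end.
--     lo, hi = 0, len(arr)
--     for i, q in enumerate(query):
--         m = hi - lo
--         if q >= m:
--             q = m - 1
--         if i % 2 == 0:
--             hi = lo + _norm(q + 1, m)
--         else:
--             lo = lo + _norm(q, m)
--     return arr[lo:hi]
-- ===== Notes on version B (the rewrite author's own statement) =====
-- stated objective: alternative
-- what changed: Instead of materializing a new list slice for every query, B keeps only the window bounds lo/hi into the original array, updates them in O(1) per query (with an explicit slice-boundary normalization), and slices the array once at the end.
import Mathlib
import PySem

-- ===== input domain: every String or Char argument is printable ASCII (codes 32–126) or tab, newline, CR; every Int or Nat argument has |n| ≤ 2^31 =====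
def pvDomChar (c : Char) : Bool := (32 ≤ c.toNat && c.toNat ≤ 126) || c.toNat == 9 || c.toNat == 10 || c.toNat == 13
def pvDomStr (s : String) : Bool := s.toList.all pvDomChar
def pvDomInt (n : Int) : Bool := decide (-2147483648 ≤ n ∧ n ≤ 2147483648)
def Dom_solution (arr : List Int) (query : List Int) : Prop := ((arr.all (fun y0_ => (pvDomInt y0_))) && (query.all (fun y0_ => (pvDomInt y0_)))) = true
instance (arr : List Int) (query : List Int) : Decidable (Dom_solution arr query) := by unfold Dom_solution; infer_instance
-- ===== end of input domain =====

-- B tracks the surviving window [lo, hi) by indices, updating bounds per query and slicing once at the end, instead of A's per-query list slicing; return values proved equal on all inputs.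
-- ===== PORT A =====
def solution (arr : List Int) (query : List Int) : List Int :=
  (PySem.List.pyRange 0 (PySem.List.len query) 1).foldl
    (fun a i =>
      let q0 := PySem.List.pyGetD query i 0
      let q := if q0 ≥ PySem.List.len a then PySem.List.len a - 1 else q0
      if PySem.Int.mod i 2 = 0 then PySem.List.slice a none (some (q + 1))
      else PySem.List.slice a (some q) none) arr

-- ===== PORT B =====
-- normalize a slice boundary (known to be ≤ m) for a window of length m (Source B's _norm)
def pvNorm (idx : Int) (m : Int) : Int :=
  let idx := if idx < 0 then idx + m else idx
  if 0 < idx then idx else 0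

-- one loop iteration of Source B: update the (lo, hi) window for query entry (i, q)
def solutionAltStep (st : Int × Int) (p : Int × Int) : Int × Int :=
  let m := st.2 - st.1
  let q := if p.2 ≥ m then m - 1 else p.2
  if PySem.Int.mod p.1 2 = 0 then (st.1, st.1 + pvNorm (q + 1) m)
  else (st.1 + pvNorm q m, st.2)

def solution_alt (arr : List Int) (query : List Int) : List Int :=
  let st := (PySem.List.enumerate query 0).foldl solutionAltStep (0, PySem.List.len arr)
  PySem.List.slice arr (some st.1) (some st.2)

-- ===== PRECONDITION & SPEC =====
def Spec_solution (arr : List Int) (query : List Int) (out : List Int) : Prop := out = solution_alt arr query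
instance (arr : List Int) (query : List Int) (out : List Int) : Decidable (Spec_solution arr query out) := by unfold Spec_solution; infer_instance

-- ===== CLAIM (what is proved, stated in full; the proofs are below) =====
def Claim_equal_solution : Prop := ∀ (arr : List Int) (query : List Int), Dom_solution arr query → Spec_solution arr query (solution arr query)

-- ===== LEMMAS AND PROOFS =====

-- A's loop body, as a function of the pair (index, query value)
def solutionAStep (a : List Int) (p : Int × Int) : List Int :=
  let q := if p.2 ≥ PySem.List.len a then PySem.List.len a - 1 else p.2
  if PySem.Int.mod p.1 2 = 0 then PySem.List.slice a none (some (q + 1))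
  else PySem.List.slice a (some q) none

lemma solution_eq_enum_fold (arr query : List Int) :
    solution arr query = (PySem.List.enumerate query 0).foldl solutionAStep arr := by
  rw [PySem.List.enumerate_eq_map_pyRange (d := 0), List.foldl_map]
  rfl

lemma slice_none_some_eq (w : List Int) (e : Int) :
    PySem.List.slice w none (some e) = w.take (pvNorm e (w.length)).toNat := by
  by_cases h : 0 ≤ e
  · rw [PySem.List.slice_to _ h]; congr 1; simp only [pvNorm]; split_ifs <;> omega
  · have hk : 0 < (-e).toNat := by omega
    have he' : e = -(((-e).toNat : Nat) : Int) := by omega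
    rw [he', PySem.List.slice_to_neg_natCast _ _ hk]
    congr 1; simp only [pvNorm]; split_ifs <;> omega

lemma slice_some_none_eq (w : List Int) (s : Int) :
    PySem.List.slice w (some s) none = w.drop (pvNorm s (w.length)).toNat := by
  by_cases h : 0 ≤ s
  · rw [PySem.List.slice_from _ h]; congr 1; simp only [pvNorm]; split_ifs <;> omega
  · have hk : 0 < (-s).toNat := by omega
    have hs' : s = -(((-s).toNat : Nat) : Int) := by omega
    rw [hs', PySem.List.slice_from_neg_natCast _ _ hk]
    congr 1; simp only [pvNorm]; split_ifs <;> omega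

lemma pvNorm_nonneg (i m : Int) : 0 ≤ pvNorm i m := by
  simp only [pvNorm]; split_ifs <;> omega

lemma pvNorm_le (i m : Int) (h : i ≤ m) (hm : 0 ≤ m) : pvNorm i m ≤ m := by
  simp only [pvNorm]; split_ifs <;> omega

-- one step of A on the window slice equals the slice at B's updated bounds, and the bounds stay in range
lemma step_eq (arr : List Int) (lo hi : Int) (p : Int × Int)
    (h0 : 0 ≤ lo) (h1 : lo ≤ hi) (h2 : hi ≤ (arr.length : Int)) :
    solutionAStep (PySem.List.slice arr (some lo) (some hi)) p =
      PySem.List.slice arr (some (solutionAltStep (lo, hi) p).1) (some (solutionAltStep (lo, hi) p).2) ∧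
    0 ≤ (solutionAltStep (lo, hi) p).1 ∧ (solutionAltStep (lo, hi) p).1 ≤ (solutionAltStep (lo, hi) p).2 ∧
    (solutionAltStep (lo, hi) p).2 ≤ (arr.length : Int) := by
  have hw : PySem.List.slice arr (some lo) (some hi) = (arr.drop lo.toNat).take (hi.toNat - lo.toNat) :=
    PySem.List.slice_toNat _ h0 (by omega)
  have hwl : (PySem.List.slice arr (some lo) (some hi)).length = hi.toNat - lo.toNat := by
    rw [hw]; simp; omega
  have hwl' : ((PySem.List.slice arr (some lo) (some hi)).length : Int) = hi - lo := by
    rw [hwl]; omega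
  simp only [solutionAStep, solutionAltStep, PySem.List.len_eq, hwl']
  set q : Int := if p.2 ≥ hi - lo then hi - lo - 1 else p.2 with hq
  have hqle : q ≤ hi - lo := by rw [hq]; split_ifs <;> omega
  clear_value q
  by_cases hpar : PySem.Int.mod p.1 2 = 0
  · simp only [hpar, if_true]
    refine ⟨?_, by omega, ?_, ?_⟩
    · rw [slice_none_some_eq, hwl]
      have hnn := pvNorm_nonneg (q+1) (hi - lo)
      have hle := pvNorm_le (q+1) (hi - lo) (by omega) (by omega)
      have hrhs : PySem.List.slice arr (some lo) (some (lo + pvNorm (q+1) (hi-lo))) =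
          (arr.drop lo.toNat).take ((lo + pvNorm (q+1) (hi-lo)).toNat - lo.toNat) :=
        PySem.List.slice_toNat _ h0 (by omega)
      rw [hrhs, hw, List.take_take]
      congr 1
      have hc : ((hi.toNat - lo.toNat : Nat) : Int) = hi - lo := by omega
      rw [hc]; omega
    · have := pvNorm_nonneg (q+1) (hi - lo); omega
    · have := pvNorm_le (q+1) (hi - lo) (by omega) (by omega); omega
  · simp only [hpar, if_false]
    refine ⟨?_, ?_, ?_, h2⟩
    · rw [slice_some_none_eq, hwl]
      have hnn := pvNorm_nonneg q (hi - lo)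
      have hle := pvNorm_le q (hi - lo) (by omega) (by omega)
      have hrhs : PySem.List.slice arr (some (lo + pvNorm q (hi-lo))) (some hi) =
          (arr.drop (lo + pvNorm q (hi-lo)).toNat).take (hi.toNat - (lo + pvNorm q (hi-lo)).toNat) :=
        PySem.List.slice_toNat _ (by omega) (by omega)
      rw [hrhs, hw, List.drop_take, List.drop_drop]
      have hc : ((hi.toNat - lo.toNat : Nat) : Int) = hi - lo := by omega
      rw [hc]
      have hd : lo.toNat + (pvNorm q (hi - lo)).toNat = (lo + pvNorm q (hi - lo)).toNat := by omega
      rw [hd]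
      congr 1
      omega
    · have := pvNorm_nonneg q (hi - lo); omega
    · have := pvNorm_le q (hi - lo) (by omega) (by omega); omega

-- the loop invariant: A's working list is always the slice of arr at B's current bounds
lemma loop_inv (ps : List (Int × Int)) : ∀ (arr : List Int) (lo hi : Int),
    0 ≤ lo → lo ≤ hi → hi ≤ (arr.length : Int) →
    ps.foldl solutionAStep (PySem.List.slice arr (some lo) (some hi)) =
      PySem.List.slice arr (some (ps.foldl solutionAltStep (lo, hi)).1)
        (some (ps.foldl solutionAltStep (lo, hi)).2) := by
  induction ps with
  | nil => intro arr lo hi _ _ _; rfl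
  | cons p ps ih =>
    intro arr lo hi h0 h1 h2
    obtain ⟨heq, b0, b1, b2⟩ := step_eq arr lo hi p h0 h1 h2
    simp only [List.foldl_cons, heq]
    exact ih arr _ _ b0 b1 b2

-- ===== VERDICT (by name: the statement is the Claim_ definition above) =====
theorem solution_spec : Claim_equal_solution := by
  intro arr query _
  unfold Spec_solution solution_alt
  rw [solution_eq_enum_fold]
  have h := loop_inv (PySem.List.enumerate query 0) arr 0 (PySem.List.len arr)
    le_rfl (by simp [PySem.List.len_eq]) (by simp [PySem.List.len_eq])
  rw [show PySem.List.slice arr (some 0) (some (PySem.List.len arr)) = arr by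
        simp [PySem.List.len_eq]] at h
  exact h
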